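-- pv_equiv track=rewrite | github.com/1horstmann/SafeControl-Master-Nadzoru2 | AuxiliaryFunctions.py | loop_verification
-- ===== SOURCE A (Python) =====
-- def loop_verification(targets, State_Sequence):
--     Loop = False
--     if len(State_Sequence) > 1:
--
--         State_Sequence_actual_way = list()
--         if len(State_Sequence) > 2:
--             for i in range(0, 2):
--                 State_Sequence_actual_way.append(State_Sequence[i])
--         else:
--             State_Sequence_actual_way = State_Sequence
--
--         First = State_Sequence_actual_way[0]
--         Position = list()
--         for i in range(0, len(targets)):
--             if First == targets[i]:
--                 Position.append(i)
--
--         Len_State = len(State_Sequence_actual_way)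
--         Possible_matrix = list()
--         for each in Position:
--             Possible_vetor = list()
--             if (each + Len_State) <= len(targets):
--                 for i in range(each, each + Len_State):
--                     Possible_vetor.append(targets[i])
--             Possible_matrix.append(Possible_vetor)
--
--         for each in Possible_matrix:
--             if each == State_Sequence_actual_way:
--                 Loop = True
--                 break
--     return Loop
-- ===== SOURCE B (Python) =====
-- def loop_verification(targets, State_Sequence):
--     if len(State_Sequence) <= 1:
--         return False
--     a, b = State_Sequence[0], State_Sequence[1]
--     return any(x == a and y == b for x, y in zip(targets, targets[1:]))
-- ===== Notes on version B (the rewrite author's own statement) =====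
-- stated objective: simpler
-- what changed: Replaces the build-Position-index-then-window-matrix machinery (four loops and two intermediate lists) with one fused any-scan over consecutive pairs of targets (zip of targets with its tail) compared to the first two states.
import Mathlib
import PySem

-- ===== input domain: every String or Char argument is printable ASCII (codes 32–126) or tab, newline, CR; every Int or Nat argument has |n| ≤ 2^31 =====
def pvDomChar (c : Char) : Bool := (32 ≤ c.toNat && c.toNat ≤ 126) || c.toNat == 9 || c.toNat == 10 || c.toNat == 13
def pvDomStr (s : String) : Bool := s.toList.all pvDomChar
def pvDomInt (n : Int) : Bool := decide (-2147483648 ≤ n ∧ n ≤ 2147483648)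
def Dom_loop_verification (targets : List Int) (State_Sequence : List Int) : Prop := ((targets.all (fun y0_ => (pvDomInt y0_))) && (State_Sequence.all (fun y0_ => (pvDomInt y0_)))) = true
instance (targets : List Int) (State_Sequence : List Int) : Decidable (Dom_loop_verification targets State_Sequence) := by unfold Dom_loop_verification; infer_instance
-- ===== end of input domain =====

-- B replaces A's index-list + window-matrix construction with one fused scan over adjacent target pairs (simpler, fewer passes).
-- ===== PORT A =====
-- literal transliteration of A: build actual_way, index list Position, window matrix, then scan with break
def loop_verification (targets : List Int) (State_Sequence : List Int) : Bool :=
  let Loop := false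
  if State_Sequence.length > 1 then
    let actual : List Int :=
      if State_Sequence.length > 2 then
        (PySem.List.pyRange 0 2 1).foldl
          (fun acc i => acc ++ [PySem.List.pyGetD State_Sequence i 0]) []
      else State_Sequence
    let First := PySem.List.pyGetD actual 0 0
    let Position : List Int :=
      (PySem.List.pyRange 0 targets.length 1).foldl
        (fun acc i => if First = PySem.List.pyGetD targets i 0 then acc ++ [i] else acc) []
    let LenState : Int := actual.length
    let Possible_matrix : List (List Int) :=
      Position.foldl
        (fun acc each =>
          let vetor : List Int :=
            if each + LenState ≤ targets.length then
              (PySem.List.pyRange each (each + LenState) 1).foldl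
                (fun v i => v ++ [PySem.List.pyGetD targets i 0]) []
            else []
          acc ++ [vetor]) []
    Possible_matrix.foldl (fun l each => if l then l else if each = actual then true else l) Loop
  else Loop

-- ===== PORT B =====
-- B: early False for short sequences, then one fused any-scan over consecutive pairs of targets
def loop_verification_alt (targets : List Int) (State_Sequence : List Int) : Bool :=
  if State_Sequence.length ≤ 1 then false
  else
    let a := PySem.List.pyGetD State_Sequence 0 0
    let b := PySem.List.pyGetD State_Sequence 1 0
    (targets.zip (targets.drop 1)).any (fun p => p.1 = a && p.2 = b)

-- ===== PRECONDITION & SPEC =====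
def Spec_loop_verification (targets : List Int) (State_Sequence : List Int) (out : Bool) : Prop := out = loop_verification_alt targets State_Sequence
instance (targets : List Int) (State_Sequence : List Int) (out : Bool) : Decidable (Spec_loop_verification targets State_Sequence out) := by unfold Spec_loop_verification; infer_instance

-- ===== CLAIM (what is proved, stated in full; the proofs are below) =====
def Claim_equal_loop_verification : Prop := ∀ (targets : List Int) (State_Sequence : List Int), Dom_loop_verification targets State_Sequence → Spec_loop_verification targets State_Sequence (loop_verification targets State_Sequence)

-- ===== LEMMAS AND PROOFS =====

-- A's final scan-with-break is an `any`
theorem foldl_break_any (xs : List (List Int)) (ac : List Int) (b : Bool) :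
    xs.foldl (fun l each => if l then l else if each = ac then true else l) b
      = (b || xs.any (fun each => each = ac)) := by
  induction xs generalizing b with
  | nil => simp
  | cons x xs ih =>
      simp only [List.foldl_cons, List.any_cons, ih]
      by_cases hb : b <;> by_cases hx : x = ac <;> simp [hb, hx]

-- the two-element window built by A's inner loop
theorem window_eq (targets : List Int) (e : Int) :
    (PySem.List.pyRange e (e + 2) 1).foldl
      (fun v i => v ++ [PySem.List.pyGetD targets i 0]) []
    = [PySem.List.pyGetD targets e 0, PySem.List.pyGetD targets (e + 1) 0] := by
  rw [PySem.List.pyRange_one_cons (by omega), PySem.List.pyRange_one_cons (by omega),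
      PySem.List.pyRange_one_eq_nil (by omega)]
  simp

-- B's zip-scan as an existential over adjacent indices
theorem alt_any_iff (targets : List Int) (a b : Int) :
    ((targets.zip (targets.drop 1)).any (fun p => p.1 = a && p.2 = b) = true)
      ↔ ∃ k : Nat, ∃ h : k + 1 < targets.length, targets[k] = a ∧ targets[k + 1] = b := by
  rw [List.any_eq_true]
  constructor
  · rintro ⟨p, hp, hpp⟩
    rw [List.mem_iff_getElem] at hp
    obtain ⟨k, hk, hke⟩ := hp
    have hk' : k + 1 < targets.length := by
      simp [List.length_zip] at hk; omega
    refine ⟨k, hk', ?_, ?_⟩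
    · have := List.getElem_zip (l := targets) (l' := targets.drop 1) (i := k) (h := hk)
      rw [this] at hke
      simp only [← hke, decide_eq_true_eq, Bool.and_eq_true] at hpp
      exact hpp.1
    · have := List.getElem_zip (l := targets) (l' := targets.drop 1) (i := k) (h := hk)
      rw [this] at hke
      simp only [← hke, decide_eq_true_eq, Bool.and_eq_true] at hpp
      have hd : (targets.drop 1)[k]'(by simp; omega) = targets[k + 1] := by
        rw [List.getElem_drop]; congr 1; omega
      rw [hd] at hpp
      exact hpp.2
  · rintro ⟨k, hk, h1, h2⟩
    have hkz : k < (targets.zip (targets.drop 1)).length := by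
      simp [List.length_zip]; omega
    refine ⟨(targets.zip (targets.drop 1))[k], List.getElem_mem hkz, ?_⟩
    rw [List.getElem_zip]
    have hd : (targets.drop 1)[k]'(by simp; omega) = targets[k + 1] := by
      rw [List.getElem_drop]; congr 1; omega
    simp [h1, h2]

-- A's Position loop is a filter over the index range
theorem position_eq (targets : List Int) (f : Int) (acc : List Int) (lo hi : Int) :
    (PySem.List.pyRange lo hi 1).foldl
      (fun acc i => if f = PySem.List.pyGetD targets i 0 then acc ++ [i] else acc) acc
    = acc ++ (PySem.List.pyRange lo hi 1).filter (fun i => f = PySem.List.pyGetD targets i 0) := by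
  induction (PySem.List.pyRange lo hi 1) generalizing acc with
  | nil => simp
  | cons x xs ih =>
      simp only [List.foldl_cons, List.filter_cons]
      by_cases hx : f = PySem.List.pyGetD targets x 0
      · rw [if_pos hx, ih, if_pos (by simpa using hx)]
        simp
      · rw [if_neg hx, ih, if_neg (by simpa using hx)]

-- A's matrix loop is a map over Position
theorem matrix_eq (g : Int → List Int) (pos : List Int) (acc : List (List Int)) :
    pos.foldl (fun acc each => acc ++ [g each]) acc = acc ++ pos.map g := by
  induction pos generalizing acc with
  | nil => simp
  | cons x xs ih => simp [ih]

-- core equivalence for sequences of length ≥ 2 with known first two states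
theorem core_eq (targets : List Int) (a b : Int) :
    ((((PySem.List.pyRange 0 (targets.length : Int) 1).filter
          (fun i => a = PySem.List.pyGetD targets i 0)).map
        (fun each =>
          if each + 2 ≤ (targets.length : Int) then
            [PySem.List.pyGetD targets each 0, PySem.List.pyGetD targets (each + 1) 0]
          else [])).any (fun each => each = [a, b]))
    = (targets.zip (targets.drop 1)).any (fun p => p.1 = a && p.2 = b) := by
  rw [Bool.eq_iff_iff, alt_any_iff]
  rw [List.any_eq_true]
  constructor
  · rintro ⟨w, hw, hww⟩
    rw [List.mem_map] at hw
    obtain ⟨i, hi, hie⟩ := hw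
    rw [List.mem_filter] at hi
    obtain ⟨hir, _⟩ := hi
    rw [PySem.List.mem_pyRange_one] at hir
    by_cases hle : i + 2 ≤ (targets.length : Int)
    · simp only [hle, if_pos] at hie
      subst hie
      simp only [decide_eq_true_eq] at hww
      refine ⟨i.toNat, by omega, ?_, ?_⟩
      · rw [← PySem.List.pyGetD_eq_getElem targets (i := i) 0 (by omega) (by omega)]
        injection hww
      · have h2' : PySem.List.pyGetD targets (i + 1) 0 = b := by
          simpa using congrArg (fun l => l.getD 1 0) hww
        rw [PySem.List.pyGetD_eq_getElem targets (i := i + 1) 0 (by omega) (by omega)] at h2'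
        simpa [show (i + 1).toNat = i.toNat + 1 by omega] using h2'
    · simp only [hle, if_neg, not_false_iff] at hie
      subst hie
      simp at hww
  · rintro ⟨k, hk, h1, h2⟩
    refine ⟨[a, b], ?_, by simp⟩
    rw [List.mem_map]
    refine ⟨(k : Int), ?_, ?_⟩
    · rw [List.mem_filter, PySem.List.mem_pyRange_one]
      refine ⟨⟨by omega, by omega⟩, ?_⟩
      simp only [decide_eq_true_eq]
      rw [PySem.List.pyGetD_eq_getElem targets (i := (k : Int)) 0 (by omega) (by omega)]
      simp [h1]
    · have hle : (k : Int) + 2 ≤ (targets.length : Int) := by omega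
      rw [if_pos hle]
      rw [PySem.List.pyGetD_eq_getElem targets (i := (k : Int)) 0 (by omega) (by omega),
          PySem.List.pyGetD_eq_getElem targets (i := (k : Int) + 1) 0 (by omega) (by omega)]
      have e1 : ((k : Int)).toNat = k := by omega
      have e2 : ((k : Int) + 1).toNat = k + 1 := by omega
      simp only [e1, e2, h1, h2]

-- the actual_way list is the first two states
theorem actual_eq (s0 s1 : Int) (rest : List Int) :
    (if (s0 :: s1 :: rest).length > 2 then
        (PySem.List.pyRange 0 2 1).foldl
          (fun acc i => acc ++ [PySem.List.pyGetD (s0 :: s1 :: rest) i 0]) []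
      else (s0 :: s1 :: rest)) = [s0, s1] := by
  by_cases h : (s0 :: s1 :: rest).length > 2
  · rw [if_pos h]
    have : PySem.List.pyRange 0 2 1 = [0, 1] := by decide
    rw [this]
    simp [PySem.List.pyGetD]
  · rw [if_neg h]
    simp at h
    have : rest = [] := by
      cases rest with
      | nil => rfl
      | cons x xs => simp at h
    simp [this]

-- ===== VERDICT (by name: the statement is the Claim_ definition above) =====
theorem loop_verification_spec : Claim_equal_loop_verification := by
  intro targets S _
  unfold Spec_loop_verification loop_verification loop_verification_alt
  match S with
  | [] => simp
  | [s] => simp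
  | s0 :: s1 :: rest =>
    have hlen : (s0 :: s1 :: rest).length > 1 := by simp
    have h1 : (s0 :: s1 :: rest).length > 1 := by simp
    have h2 : ¬ (s0 :: s1 :: rest).length ≤ 1 := by simp
    simp only [if_pos h1, if_neg h2, actual_eq, PySem.List.pyGetD_zero_cons]
    have hl2 : ((([s0, s1] : List Int)).length : Int) = 2 := by simp
    have hs1 : PySem.List.pyGetD (s0 :: s1 :: rest) 1 0 = s1 := by
      simp [PySem.List.pyGetD]
    simp only [hl2, hs1]
    rw [position_eq, matrix_eq, foldl_break_any]
    simp only [List.nil_append, Bool.false_or, window_eq]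
    exact core_eq targets s0 s1
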